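-- pv_equiv track=rewrite | github.com/Tabernacle666/book_factory | build/build_pdf.py | split_content_sections
-- ===== SOURCE A (Python) =====
-- def split_content_sections(merged_markdown: str) -> list[str]:
--     lines = merged_markdown.splitlines()
--     blocks = []
--     current = []
--     for line in lines:
--         if line.startswith('# ') and current:
--             blocks.append('\n'.join(current).strip())
--             current = [line]
--         else:
--             current.append(line)
--     if current:
--         blocks.append('\n'.join(current).strip())
--     return [b for b in blocks if b]
-- ===== SOURCE B (Python) =====
-- def split_content_sections(merged_markdown: str) -> list[str]:
--     lines = merged_markdown.splitlines()
--     segments = []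
--     while lines:
--         i = 1
--         while i < len(lines) and not lines[i].startswith('# '):
--             i += 1
--         segments.append(lines[:i])
--         lines = lines[i:]
--     sections = ['\n'.join(seg).strip() for seg in segments]
--     return [s for s in sections if s]
-- ===== Notes on version B (the rewrite author's own statement) =====
-- stated objective: alternative
-- what changed: Replaces A's stateful accumulator/flush fold (blocks+current with conditional flushing) by a segment-cutting loop: from each remaining head, scan forward to the next top-level header and slice off one whole segment, then join/strip/filter the segments in a comprehension.
import Mathlib
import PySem

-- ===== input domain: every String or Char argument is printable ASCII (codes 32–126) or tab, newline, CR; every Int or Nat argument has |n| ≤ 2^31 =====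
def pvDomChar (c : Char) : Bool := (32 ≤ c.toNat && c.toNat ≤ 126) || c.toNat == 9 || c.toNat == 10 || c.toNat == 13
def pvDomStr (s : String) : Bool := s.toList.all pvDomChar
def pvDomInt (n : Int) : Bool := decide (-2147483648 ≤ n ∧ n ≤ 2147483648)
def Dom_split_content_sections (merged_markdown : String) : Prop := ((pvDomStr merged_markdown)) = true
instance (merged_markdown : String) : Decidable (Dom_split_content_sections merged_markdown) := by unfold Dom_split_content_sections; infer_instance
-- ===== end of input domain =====

-- B replaces A's stateful accumulator/flush fold by a segment-cutting recursion (scan to the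
-- next top-level header, slice off one segment), then join/strip/filter; same cost (alternative).

-- ===== PORT A =====
def split_content_sections (merged_markdown : String) : List String :=
  let lines := PySem.Str.splitlines merged_markdown
  let st := lines.foldl (fun (acc : List String × List String) line =>
      if PySem.Str.startswith line "# " && !acc.2.isEmpty then
        (acc.1 ++ [PySem.Str.strip (PySem.Str.join "\n" acc.2)], [line])
      else
        (acc.1, acc.2 ++ [line])) ([], [])
  let blocks := if !st.2.isEmpty then st.1 ++ [PySem.Str.strip (PySem.Str.join "\n" st.2)] else st.1
  blocks.filter (fun b => !(b == ""))

-- ===== PORT B =====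
-- not a header line (the inner scan's condition in Source B)
def pvNH (s : String) : Bool := !PySem.Str.startswith s "# "

-- the while-loop of Source B: cut off one segment (head line plus following non-header lines), recurse on the rest
def pvSegs : List String → List (List String)
  | [] => []
  | l :: ls => (l :: ls.takeWhile pvNH) :: pvSegs (ls.dropWhile pvNH)
  termination_by ls => ls.length
  decreasing_by
    simpa using Nat.lt_succ_of_le (List.length_dropWhile_le _ _)

def split_content_sections_alt (merged_markdown : String) : List String :=
  let sections := (pvSegs (PySem.Str.splitlines merged_markdown)).map
      (fun seg => PySem.Str.strip (PySem.Str.join "\n" seg))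
  sections.filter (fun s => !(s == ""))

-- ===== PRECONDITION & SPEC =====
def Spec_split_content_sections (merged_markdown : String) (out : List String) : Prop := out = split_content_sections_alt merged_markdown
instance (merged_markdown : String) (out : List String) : Decidable (Spec_split_content_sections merged_markdown out) := by unfold Spec_split_content_sections; infer_instance

-- ===== CLAIM (what is proved, stated in full; the proofs are below) =====
def Claim_equal_split_content_sections : Prop := ∀ (merged_markdown : String), Dom_split_content_sections merged_markdown → Spec_split_content_sections merged_markdown (split_content_sections merged_markdown)

-- ===== LEMMAS AND PROOFS =====

-- proof-only names for the terms inside port A (definitionally equal to its inline lambdas)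
def pvJ (seg : List String) : String := PySem.Str.strip (PySem.Str.join "\n" seg)

def pvStep (acc : List String × List String) (line : String) : List String × List String :=
  if PySem.Str.startswith line "# " && !acc.2.isEmpty then
    (acc.1 ++ [pvJ acc.2], [line])
  else
    (acc.1, acc.2 ++ [line])

def pvFlush (st : List String × List String) : List String :=
  if !st.2.isEmpty then st.1 ++ [pvJ st.2] else st.1

lemma A_eq (s : String) : split_content_sections s
    = (pvFlush ((PySem.Str.splitlines s).foldl pvStep ([], []))).filter (fun b => !(b == "")) := rfl

lemma B_eq (s : String) : split_content_sections_alt s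
    = ((pvSegs (PySem.Str.splitlines s)).map pvJ).filter (fun b => !(b == "")) := rfl

lemma pvSegs_cons (l : String) (ls : List String) :
    pvSegs (l :: ls) = (l :: ls.takeWhile pvNH) :: pvSegs (ls.dropWhile pvNH) := by
  rw [pvSegs]

-- loop invariant: with a non-empty open segment `current`, running A's fold and flushing
-- yields exactly the blocks that B's segment cutting produces, with `current` prepended
-- to the first segment of the remaining lines.
lemma foldFlush (lines : List String) : ∀ blocks current, current ≠ [] →
    pvFlush (lines.foldl pvStep (blocks, current))
      = blocks ++ ((current ++ lines.takeWhile pvNH) :: pvSegs (lines.dropWhile pvNH)).map pvJ := by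
  induction lines with
  | nil =>
    intro blocks current h
    simp [pvFlush, pvSegs, h]
  | cons l ls ih =>
    intro blocks current h
    by_cases hl : PySem.Str.startswith l "# " = true
    · have hnh : pvNH l = false := by unfold pvNH; rw [hl]; rfl
      have hstep : pvStep (blocks, current) l = (blocks ++ [pvJ current], [l]) := by
        unfold pvStep; rw [hl]
        simp [List.isEmpty_eq_false_iff.mpr h]
      rw [List.foldl_cons, hstep, ih _ [l] (by simp),
        List.takeWhile_cons_of_neg (by simp [hnh]),
        List.dropWhile_cons_of_neg (by simp [hnh]), pvSegs_cons]
      simp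
    · have hl' : PySem.Str.startswith l "# " = false := by
        exact Bool.not_eq_true _ ▸ eq_false_of_ne_true hl
      have hnh : pvNH l = true := by unfold pvNH; rw [hl']; rfl
      have hstep : pvStep (blocks, current) l = (blocks, current ++ [l]) := by
        unfold pvStep; rw [hl']; simp
      rw [List.foldl_cons, hstep, ih _ _ (by simp),
        List.takeWhile_cons_of_pos hnh, List.dropWhile_cons_of_pos hnh]
      simp

lemma main_eq (lines : List String) :
    pvFlush (lines.foldl pvStep ([], [])) = (pvSegs lines).map pvJ := by
  cases lines with
  | nil => simp [pvFlush, pvSegs]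
  | cons l ls =>
    have hstep : pvStep ([], []) l = ([], [l]) := by
      simp [pvStep]
    rw [List.foldl_cons, hstep, foldFlush ls [] [l] (by simp), pvSegs_cons]
    simp

-- ===== VERDICT (by name: the statement is the Claim_ definition above) =====
theorem split_content_sections_spec : Claim_equal_split_content_sections := by
  intro s _
  unfold Spec_split_content_sections
  rw [A_eq, B_eq, main_eq]
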